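-- pv_equiv track=rewrite | github.com/DaRkZ1177/iot-secops | backend/main.py | compute_threat_level
-- ===== SOURCE A (Python) =====
-- THREAT_HIGH_RATE_LIMIT_COUNT  = 3   # >= 3 rate_limit/mqtt_flood events in 30s → HIGH
--
-- THREAT_HIGH_BRUTE_FORCE_COUNT = 2   # >= 2 brute_force events in 30s → HIGH
--
-- THREAT_MEDIUM_ANOMALY_COUNT   = 3   # >= 3 anomaly/drift events in 30s → MEDIUM
--
-- def compute_threat_level(recent_events: list) -> str:
--     """
--     Count event types in the recent window.
--     HIGH requires SUSTAINED attack (>= threshold count), not a single event.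
--     """
--     rate_limit_count  = sum(1 for e in recent_events if e["type"] in ("rate_limit", "mqtt_flood"))
--     brute_force_count = sum(1 for e in recent_events if e["type"] in ("mqtt_brute_force",))
--     anomaly_count     = sum(1 for e in recent_events if e["type"] in ("anomaly", "mqtt_anomaly", "behavior_drift"))
--
--     if rate_limit_count >= THREAT_HIGH_RATE_LIMIT_COUNT or brute_force_count >= THREAT_HIGH_BRUTE_FORCE_COUNT:
--         return "HIGH"
--     if anomaly_count >= THREAT_MEDIUM_ANOMALY_COUNT:
--         return "MEDIUM"
--     return "LOW"
-- ===== SOURCE B (Python) =====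
-- THREAT_HIGH_RATE_LIMIT_COUNT  = 3
-- THREAT_HIGH_BRUTE_FORCE_COUNT = 2
-- THREAT_MEDIUM_ANOMALY_COUNT   = 3
--
-- def compute_threat_level(recent_events: list) -> str:
--     # Single streaming pass with three counters and an early return the moment
--     # a HIGH threshold is reached (correct: counts only grow, so later events
--     # cannot change a HIGH verdict).
--     rate = brute = anom = 0
--     for e in recent_events:
--         t = e["type"]
--         if t == "rate_limit" or t == "mqtt_flood":
--             rate += 1
--             if rate >= THREAT_HIGH_RATE_LIMIT_COUNT:
--                 return "HIGH"
--         elif t == "mqtt_brute_force":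
--             brute += 1
--             if brute >= THREAT_HIGH_BRUTE_FORCE_COUNT:
--                 return "HIGH"
--         elif t in ("anomaly", "mqtt_anomaly", "behavior_drift"):
--             anom += 1
--     return "MEDIUM" if anom >= THREAT_MEDIUM_ANOMALY_COUNT else "LOW"
-- ===== Notes on version B (the rewrite author's own statement) =====
-- stated objective: alternative
-- what changed: Replaces A's three separate generator scans plus a final threshold cascade with a single streaming pass keeping three counters and returning HIGH early as soon as a HIGH threshold is hit, deciding MEDIUM/LOW only at the end.
import Mathlib
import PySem

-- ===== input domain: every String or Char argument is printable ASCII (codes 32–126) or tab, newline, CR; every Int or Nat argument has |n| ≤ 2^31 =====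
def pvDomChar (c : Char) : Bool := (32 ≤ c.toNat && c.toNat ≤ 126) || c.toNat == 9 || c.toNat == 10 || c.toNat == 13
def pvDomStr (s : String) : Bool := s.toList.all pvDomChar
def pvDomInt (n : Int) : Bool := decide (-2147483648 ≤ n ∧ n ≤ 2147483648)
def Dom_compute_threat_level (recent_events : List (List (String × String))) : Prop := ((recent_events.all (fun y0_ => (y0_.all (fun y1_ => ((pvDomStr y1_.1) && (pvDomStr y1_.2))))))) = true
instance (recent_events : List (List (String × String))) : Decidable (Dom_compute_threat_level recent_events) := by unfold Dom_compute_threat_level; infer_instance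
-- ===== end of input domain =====

-- B replaces A's three separate scans + final cascade with one streaming pass over
-- the events that keeps three counters and returns "HIGH" as soon as a HIGH
-- threshold is reached; same result, same cost.

-- ===== PORT A =====
-- e["type"]: first match in the association list; on a missing key Python raises
-- KeyError — excluded by Pre_ — so the .getD "" default is never reached there.
def pyTypeA (e : List (String × String)) : String :=
  ((PySem.Dict.mk e).get? "type").getD ""

def compute_threat_level (recent_events : List (List (String × String))) : String :=
  let rate_limit_count : Int := recent_events.foldl
    (fun acc e => if pyTypeA e = "rate_limit" ∨ pyTypeA e = "mqtt_flood" then acc + 1 else acc) 0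
  let brute_force_count : Int := recent_events.foldl
    (fun acc e => if pyTypeA e = "mqtt_brute_force" then acc + 1 else acc) 0
  let anomaly_count : Int := recent_events.foldl
    (fun acc e => if pyTypeA e = "anomaly" ∨ pyTypeA e = "mqtt_anomaly" ∨ pyTypeA e = "behavior_drift" then acc + 1 else acc) 0
  if rate_limit_count ≥ 3 ∨ brute_force_count ≥ 2 then "HIGH"
  else if anomaly_count ≥ 3 then "MEDIUM"
  else "LOW"

-- ===== PORT B =====
-- same KeyError situation as in A's port (excluded by Pre_)
def eventType (e : List (String × String)) : String :=
  ((PySem.Dict.mk e).get? "type").getD ""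

-- the loop of Source B: three counters, early "HIGH" return
def scanEvents : List (List (String × String)) → Int → Int → Int → String
  | [], _, _, anom => if anom ≥ 3 then "MEDIUM" else "LOW"
  | e :: rest, rate, brute, anom =>
    let t := eventType e
    if t = "rate_limit" ∨ t = "mqtt_flood" then
      if rate + 1 ≥ 3 then "HIGH" else scanEvents rest (rate + 1) brute anom
    else if t = "mqtt_brute_force" then
      if brute + 1 ≥ 2 then "HIGH" else scanEvents rest rate (brute + 1) anom
    else if t = "anomaly" ∨ t = "mqtt_anomaly" ∨ t = "behavior_drift" then
      scanEvents rest rate brute (anom + 1)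
    else scanEvents rest rate brute anom

def compute_threat_level_alt (recent_events : List (List (String × String))) : String :=
  scanEvents recent_events 0 0 0

-- ===== PRECONDITION & SPEC =====
-- Pre_ excludes events without a "type" key, on which Python A raises KeyError.
def Pre_compute_threat_level (recent_events : List (List (String × String))) : Prop :=
  recent_events.all (fun e => e.any (fun kv => kv.1 == "type")) = true
instance (recent_events : List (List (String × String))) : Decidable (Pre_compute_threat_level recent_events) := by unfold Pre_compute_threat_level; infer_instance

def pvWitness_compute_threat_level : (List (List (String × String))) :=
  [[("type", "anomaly")], [("type", "rate_limit"), ("src", "dev1")]]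

def Spec_compute_threat_level (recent_events : List (List (String × String))) (out : String) : Prop := out = compute_threat_level_alt recent_events
instance (recent_events : List (List (String × String))) (out : String) : Decidable (Spec_compute_threat_level recent_events out) := by unfold Spec_compute_threat_level; infer_instance

-- ===== CLAIM (what is proved, stated in full; the proofs are below) =====
def Claim_equal_compute_threat_level : Prop := ∀ (recent_events : List (List (String × String))), Dom_compute_threat_level recent_events → Pre_compute_threat_level recent_events → Spec_compute_threat_level recent_events (compute_threat_level recent_events)

-- ===== LEMMAS AND PROOFS =====

@[simp] theorem eventType_eq_pyTypeA : eventType = pyTypeA := rfl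

-- invariant of B's loop: from any in-bounds counter state it computes A's cascade
-- over the counters plus the remaining events' per-category counts
theorem scanEvents_inv (l : List (List (String × String))) (r b a : Int)
    (hr : r < 3) (hb : b < 2) :
    scanEvents l r b a =
      (if r + (l.countP (fun e => decide (pyTypeA e = "rate_limit" ∨ pyTypeA e = "mqtt_flood")) : Int) ≥ 3
          ∨ b + (l.countP (fun e => decide (pyTypeA e = "mqtt_brute_force")) : Int) ≥ 2 then "HIGH"
       else if a + (l.countP (fun e => decide (pyTypeA e = "anomaly" ∨ pyTypeA e = "mqtt_anomaly" ∨ pyTypeA e = "behavior_drift")) : Int) ≥ 3 then "MEDIUM"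
       else "LOW") := by
  induction l generalizing r b a with
  | nil => simp [scanEvents]; omega
  | cons e rest ih =>
    by_cases h1 : pyTypeA e = "rate_limit" ∨ pyTypeA e = "mqtt_flood"
    · by_cases h1' : r + 1 ≥ 3
      · rcases h1 with ht | ht <;>
          (simp [scanEvents, ht, h1']; split_ifs <;> first | rfl | omega)
      · rcases h1 with ht | ht <;>
          (rw [show scanEvents (e :: rest) r b a = scanEvents rest (r + 1) b a by
                 simp [scanEvents, ht, h1'],
               ih (r + 1) b a (by omega) hb];
           simp [ht];
           split_ifs <;> first | rfl | omega)
    · by_cases h2 : pyTypeA e = "mqtt_brute_force"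
      · by_cases h2' : b + 1 ≥ 2
        · simp [scanEvents, h2, h2']
          split_ifs <;> first | rfl | omega
        · rw [show scanEvents (e :: rest) r b a = scanEvents rest r (b + 1) a by
                simp [scanEvents, h2, h2'],
              ih r (b + 1) a hr (by omega)]
          simp [h2]
          split_ifs <;> first | rfl | omega
      · by_cases h3 : pyTypeA e = "anomaly" ∨ pyTypeA e = "mqtt_anomaly" ∨ pyTypeA e = "behavior_drift"
        · rcases h3 with ht | ht | ht <;>
            (rw [show scanEvents (e :: rest) r b a = scanEvents rest r b (a + 1) by
                   simp [scanEvents, ht],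
                 ih r b (a + 1) hr hb];
             simp [ht];
             split_ifs <;> first | rfl | omega)
        · rw [show scanEvents (e :: rest) r b a = scanEvents rest r b a by
                simp [scanEvents, h1, h2, h3],
              ih r b a hr hb]
          simp [h1, h2, h3]

-- ===== VERDICT (by name: the statement is the Claim_ definition above) =====
theorem compute_threat_level_spec : Claim_equal_compute_threat_level := by
  intro l _ _
  unfold Spec_compute_threat_level compute_threat_level compute_threat_level_alt
  rw [PySem.List.foldl_ite_add_one, PySem.List.foldl_ite_add_one, PySem.List.foldl_ite_add_one,
      scanEvents_inv l 0 0 0 (by omega) (by omega)]
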